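-- pv_equiv track=rewrite | github.com/DishaKacha7/Capstone_Group_3 | src/Patch Level/DL_time_1.py | group_band_columns
-- ===== SOURCE A (Python) =====
-- def group_band_columns(channel_cols, band_prefixes):
--     """
--     Returns a dictionary mapping each band prefix to a sorted list of columns.
--     Sorting is done based on the month number extracted from the column name.
--     """
--     band_mapping = {}
--     for prefix in band_prefixes:
--         matching = [col for col in channel_cols if col.startswith(prefix)]
--         if len(matching) == 0:
--             raise ValueError(f"No columns found for band prefix: {prefix}")
--
--         def extract_month(col):
--             # Expecting column names like 'SA_B11_1C_2017_01'
--             parts = col.split('_')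
--             try:
--                 return int(parts[-1])
--             except:
--                 return 0
--
--         matching_sorted = sorted(matching, key=extract_month)
--         band_mapping[prefix] = matching_sorted
--     return band_mapping
-- ===== SOURCE B (Python) =====
-- def group_band_columns(channel_cols, band_prefixes):
--     """
--     Returns a dictionary mapping each band prefix to a sorted list of columns.
--     Different strategy than per-group sorting: sort the WHOLE column list once
--     by month number (Python's sort is stable), then distribute the sorted
--     columns into per-prefix buckets in one pass; stability guarantees each
--     bucket comes out month-sorted with the same tie order as sorting the
--     group on its own, so no per-group sort is ever performed.
--     """
--     def extract_month(col):
--         parts = col.split('_')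
--         try:
--             return int(parts[-1])
--         except:
--             return 0
--
--     buckets = {p: [] for p in band_prefixes}
--     for col in sorted(channel_cols, key=extract_month):
--         for p in buckets:
--             if col.startswith(p):
--                 buckets[p].append(col)
--     for p, b in buckets.items():
--         if not b:
--             raise ValueError(f"No columns found for band prefix: {p}")
--     return buckets
-- ===== Notes on version B (the rewrite author's own statement) =====
-- stated objective: faster
-- what changed: B sorts the whole column list once by month and exploits sort stability to distribute the already-sorted columns into per-prefix buckets in one pass, so no per-group sort (and no per-prefix rescan of channel_cols) is performed, unlike A which filters and sorts channel_cols separately for every prefix.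
import Mathlib
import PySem

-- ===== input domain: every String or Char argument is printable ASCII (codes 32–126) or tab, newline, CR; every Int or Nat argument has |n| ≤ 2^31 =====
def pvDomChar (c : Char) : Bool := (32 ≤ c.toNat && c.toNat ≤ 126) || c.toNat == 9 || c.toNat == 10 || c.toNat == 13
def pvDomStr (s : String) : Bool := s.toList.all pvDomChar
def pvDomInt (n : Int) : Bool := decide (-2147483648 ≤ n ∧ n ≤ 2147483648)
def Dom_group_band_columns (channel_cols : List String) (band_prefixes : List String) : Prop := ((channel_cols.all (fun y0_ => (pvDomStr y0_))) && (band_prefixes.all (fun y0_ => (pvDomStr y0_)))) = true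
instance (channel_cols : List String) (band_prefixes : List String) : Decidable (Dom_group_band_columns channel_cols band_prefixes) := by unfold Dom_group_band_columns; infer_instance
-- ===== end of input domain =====

-- B sorts the whole column list ONCE by month and distributes the sorted columns into
-- per-prefix buckets in one pass (stability makes per-group sorts unnecessary), where A
-- filters and sorts channel_cols afresh for every prefix.


-- ===== PORT A =====
-- extract_month: col.split('_'); int(parts[-1]) with a bare except returning 0
-- (split? is `some` since "_" ≠ ""; the bare except also covers pyGet? = none).
def pvExtractMonth (col : String) : Int :=
  let parts := (PySem.Str.split? col "_").getD []
  match PySem.List.pyGet? parts (-1) with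
  | some s =>
    match PySem.Int.ofStr? s with
    | some n => n
    | none => 0
  | none => 0


-- sorted(xs, key=extract_month): CPython precomputes key once per element and sorts the
-- decorated (key, x) pairs stably (decorate-sort-undecorate); proved equal to
-- PySem.List.sorted in pv_sortedByKey_eq below.
def pvSortedByKey {α : Type} (xs : List α) (key : α → Int) : List α :=
  ((xs.map (fun x => (key x, x))).foldl
    (fun acc p => PySem.List.insertBy (fun a b => decide (a.1 < b.1)) p acc) []).map Prod.snd

-- literal port of A: loop over band_prefixes, filter channel_cols, sort, insert into dict;
-- the `none` state is Python's ValueError (excluded by Pre_; [] returned then).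
def group_band_columns (channel_cols : List String) (band_prefixes : List String) : List (String × List String) :=
  let res := band_prefixes.foldl
    (fun (acc : Option (PySem.Dict String (List String))) pfx =>
      match acc with
      | none => none
      | some band_mapping =>
        let matching := channel_cols.filter (fun col => PySem.Str.startswith col pfx)
        if matching.length = 0 then none
        else some (band_mapping.insert pfx (pvSortedByKey matching pvExtractMonth)))
    (some PySem.Dict.empty)
  match res with
  | some d => d.items
  | none => []

-- ===== PORT B =====
-- literal port of B: buckets = {p: [] for p in band_prefixes} (keys = deduplicated
-- prefixes), then ONE pass over sorted(channel_cols, key=extract_month) appending each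
-- column to every matching bucket, then the raise check over the buckets, then return
-- the buckets dict (= the list of pairs in bucket order).
def group_band_columns_alt (channel_cols : List String) (band_prefixes : List String) : List (String × List String) :=
  let buckets0 := (PySem.List.dedup band_prefixes).map (fun p => (p, ([] : List String)))
  let buckets := (pvSortedByKey channel_cols pvExtractMonth).foldl
    (fun bs col => bs.map (fun pb =>
      if PySem.Str.startswith col pb.1 then (pb.1, pb.2 ++ [col]) else pb))
    buckets0
  if buckets.any (fun pb => pb.2.isEmpty) then []   -- ValueError (excluded by Pre_)
  else buckets

-- ===== PRECONDITION & SPEC =====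
-- Pre_: exactly where Python A returns (it raises ValueError iff some pfx matches no column).
def Pre_group_band_columns (channel_cols : List String) (band_prefixes : List String) : Prop :=
  ∀ p ∈ band_prefixes, ∃ c ∈ channel_cols, PySem.Str.startswith c p = true
instance (channel_cols : List String) (band_prefixes : List String) : Decidable (Pre_group_band_columns channel_cols band_prefixes) := by unfold Pre_group_band_columns; infer_instance

def pvWitness_group_band_columns : List String × List String :=
  (["SA_B11_1C_2017_02", "SA_B11_1C_2017_01", "SA_B12_1C_2017_03"], ["SA_B11", "SA_B12"])

def Spec_group_band_columns (channel_cols : List String) (band_prefixes : List String) (out : List (String × List String)) : Prop := out = group_band_columns_alt channel_cols band_prefixes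
instance (channel_cols : List String) (band_prefixes : List String) (out : List (String × List String)) : Decidable (Spec_group_band_columns channel_cols band_prefixes out) := by unfold Spec_group_band_columns; infer_instance

-- ===== CLAIM (what is proved, stated in full; the proofs are below) =====
def Claim_equal_group_band_columns : Prop := ∀ (channel_cols : List String) (band_prefixes : List String), Dom_group_band_columns channel_cols band_prefixes → Pre_group_band_columns channel_cols band_prefixes → Spec_group_band_columns channel_cols band_prefixes (group_band_columns channel_cols band_prefixes)

-- ===== LEMMAS AND PROOFS =====


-- one stable insertion of a decorated pair = decorating the stable insertion
theorem pv_insertBy_dec {α : Type} (key : α → Int) (x : α) (l : List α) :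
    PySem.List.insertBy (fun a b => decide (a.1 < b.1)) (key x, x)
      (l.map (fun y => (key y, y)))
    = (PySem.List.insertBy (fun a b => decide (key a < key b)) x l).map
        (fun y => (key y, y)) := by
  induction l with
  | nil => rfl
  | cons y ys ih => by_cases h : key x < key y <;> simp [PySem.List.insertBy, h, ih]

-- decorate-sort-undecorate computes exactly PySem.List.sorted
theorem pv_sortedByKey_eq {α : Type} (xs : List α) (key : α → Int) :
    pvSortedByKey xs key = PySem.List.sorted xs key := by
  rw [PySem.List.sorted_eq_foldl_insertBy]
  unfold pvSortedByKey
  have h : ∀ acc : List α,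
      (xs.map (fun x => (key x, x))).foldl
        (fun acc p => PySem.List.insertBy (fun a b => decide (a.1 < b.1)) p acc)
        (acc.map (fun y => (key y, y)))
      = (xs.foldl (fun acc x => PySem.List.insertBy (fun a b => decide (key a < key b)) x acc)
          acc).map (fun y => (key y, y)) := by
    induction xs with
    | nil => intro acc; rfl
    | cons x xs ih =>
      intro acc
      simp only [List.map_cons, List.foldl_cons]
      rw [pv_insertBy_dec key x acc, ih]
  have h0 := h []
  simp only [List.map_nil] at h0
  rw [h0, List.map_map]
  simp [Function.comp_def]

-- the sorted bucket a pfx ends up with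
def pvG (channel_cols : List String) (p : String) : List String :=
  PySem.List.sorted (channel_cols.filter (fun col => PySem.Str.startswith col p)) pvExtractMonth

-- stable insertion at the head when x strictly precedes everything in the list
theorem pv_ins_head {α : Type} (key : α → Int) (x : α) (l : List α)
    (h : ∀ z ∈ l, key x < key z) :
    PySem.List.insertBy (fun a b => decide (key a < key b)) x l = x :: l := by
  cases l with
  | nil => rfl
  | cons y ys => simp [PySem.List.insertBy, h y (by simp)]

-- filtering commutes with one stable insertion into an already-ordered list
theorem pv_filter_insertBy {α : Type} (key : α → Int) (p : α → Bool) (x : α) (ys : List α)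
    (hs : ys.Pairwise (fun a b => key a ≤ key b)) :
    (PySem.List.insertBy (fun a b => decide (key a < key b)) x ys).filter p
    = if p x then PySem.List.insertBy (fun a b => decide (key a < key b)) x (ys.filter p)
      else ys.filter p := by
  induction ys with
  | nil => cases hpx : p x <;> simp [PySem.List.insertBy, hpx]
  | cons y ys ih =>
    rw [List.pairwise_cons] at hs
    obtain ⟨hy, hs'⟩ := hs
    by_cases hb : key x < key y
    · simp only [PySem.List.insertBy, decide_eq_true hb, if_true]
      cases hpx : p x
      · cases hpy : p y <;> simp [List.filter, hpx, hpy]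
      · cases hpy : p y
        · -- x kept, y dropped: x goes to the head of the filtered tail
          have hall : ∀ z ∈ ys.filter p, key x < key z := by
            intro z hz
            exact lt_of_lt_of_le hb (hy z (List.mem_of_mem_filter hz))
          simp [List.filter, hpx, hpy, pv_ins_head key x _ hall]
        · simp [List.filter, hpx, hpy, PySem.List.insertBy, decide_eq_true hb]
    · have hb' : decide (key x < key y) = false := by simpa using hb
      simp only [PySem.List.insertBy, hb', Bool.false_eq_true, if_false]
      cases hpx : p x
      · cases hpy : p y <;> simp [List.filter, hpx, hpy, ih hs']
      · cases hpy : p y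
        · simp [List.filter, hpy, ih hs', hpx]
        · simp [List.filter, hpy, ih hs', hpx, PySem.List.insertBy, hb']

-- STABILITY: filtering a stable-sorted list = stable-sorting the filtered list
theorem pv_filter_sorted {α : Type} (key : α → Int) (p : α → Bool) (xs : List α) :
    (PySem.List.sorted xs key).filter p = PySem.List.sorted (xs.filter p) key := by
  induction xs using List.reverseRecOn with
  | nil => rfl
  | append_singleton xs x ih =>
    have e1 : PySem.List.sorted (xs ++ [x]) key
        = PySem.List.insertBy (fun a b => decide (key a < key b)) x (PySem.List.sorted xs key) := by
      rw [PySem.List.sorted_eq_foldl_insertBy, PySem.List.sorted_eq_foldl_insertBy,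
        List.foldl_append]
      rfl
    rw [e1, pv_filter_insertBy key p x _ (PySem.List.sorted_pairwise xs key), ih,
      List.filter_append]
    cases hpx : p x
    · simp [hpx]
    · have e2 : PySem.List.sorted (xs.filter p ++ [x]) key
          = PySem.List.insertBy (fun a b => decide (key a < key b)) x
              (PySem.List.sorted (xs.filter p) key) := by
        rw [PySem.List.sorted_eq_foldl_insertBy, PySem.List.sorted_eq_foldl_insertBy,
          List.foldl_append]
        rfl
      simp [hpx, e2]

-- B's one-pass fold leaves each bucket holding exactly the matching columns, in order
theorem pv_bucket_fold (cols qs : List String) (init : String → List String) :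
    cols.foldl
      (fun bs col => bs.map (fun pb =>
        if PySem.Str.startswith col pb.1 then (pb.1, pb.2 ++ [col]) else pb))
      (qs.map (fun p => (p, init p)))
    = qs.map (fun p => (p, init p ++ cols.filter (fun col => PySem.Str.startswith col p))) := by
  induction cols generalizing init with
  | nil => simp
  | cons c cc ih =>
    simp only [List.foldl_cons]
    have hstep : (qs.map (fun p => (p, init p))).map
        (fun pb => if PySem.Str.startswith c pb.1 then (pb.1, pb.2 ++ [c]) else pb)
        = qs.map (fun p => (p, init p ++ if PySem.Str.startswith c p then [c] else [])) := by
      rw [List.map_map]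
      refine List.map_congr_left (fun p _ => ?_)
      by_cases h : PySem.Chars.startswith c.toList p.toList <;> simp [h]
    rw [hstep, ih]
    refine List.map_congr_left (fun p _ => ?_)
    by_cases h : PySem.Chars.startswith c.toList p.toList <;> simp [h]

-- inserting a key that is already present, with the value the dict already stores, changes nothing
theorem pv_insert_items (ks : List String) (g : String → List String) (p : String) :
    (PySem.Dict.insert (PySem.Dict.mk (ks.map (fun k => (k, g k)))) p (g p)).items
    = (PySem.Set.add ks p).map (fun k => (k, g k)) := by
  have hc : (PySem.Dict.mk (ks.map (fun k => (k, g k)))).contains p = decide (p ∈ ks) := by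
    simp only [PySem.Dict.contains, List.any_map]
    show ks.any (fun k => k == p) = decide (p ∈ ks)
    simp [List.any_beq']
  by_cases h : p ∈ ks
  · simp only [PySem.Dict.insert, hc, h, decide_true, if_true, PySem.Set.add, PySem.Set.contains,
      List.contains_eq_mem, List.map_map]
    refine List.map_congr_left (fun k _ => ?_)
    by_cases hk : k = p
    · simp [hk]
    · simp [hk]
  · simp only [PySem.Dict.insert, hc, h, decide_false, Bool.false_eq_true, if_false,
      PySem.Set.add, PySem.Set.contains, List.contains_eq_mem]
    simp

-- A's dict-building loop, characterised: it deduplicates the prefixes and maps each to its bucket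
theorem pv_A_fold (channel_cols : List String) (ps ks : List String)
    (h : ∀ p ∈ ps, ∃ c ∈ channel_cols, PySem.Str.startswith c p = true) :
    ps.foldl
      (fun (acc : Option (PySem.Dict String (List String))) pfx =>
        match acc with
        | none => none
        | some band_mapping =>
          let matching := channel_cols.filter (fun col => PySem.Str.startswith col pfx)
          if matching.length = 0 then none
          else some (band_mapping.insert pfx (PySem.List.sorted matching pvExtractMonth)))
      (some (PySem.Dict.mk (ks.map (fun k => (k, pvG channel_cols k)))))
    = some (PySem.Dict.mk ((ps.foldl PySem.Set.add ks).map (fun k => (k, pvG channel_cols k)))) := by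
  induction ps generalizing ks with
  | nil => simp
  | cons p ps ih =>
    obtain ⟨c, hc, hsw⟩ := h p (by simp)
    have hne : channel_cols.filter (fun col => PySem.Str.startswith col p) ≠ [] := by
      simp only [ne_eq, List.filter_eq_nil_iff, not_forall]
      exact ⟨c, hc, by simpa using hsw⟩
    simp only [List.foldl_cons]
    have hlen : (channel_cols.filter (fun col => PySem.Str.startswith col p)).length ≠ 0 := by
      simpa [List.length_eq_zero_iff] using hne
    simp only [hlen, if_false]
    have : PySem.Dict.insert (PySem.Dict.mk (ks.map (fun k => (k, pvG channel_cols k)))) p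
        (PySem.List.sorted (channel_cols.filter (fun col => PySem.Str.startswith col p)) pvExtractMonth)
        = PySem.Dict.mk ((PySem.Set.add ks p).map (fun k => (k, pvG channel_cols k))) := by
      apply PySem.Dict.ext
      exact pv_insert_items ks (pvG channel_cols) p
    rw [this]
    exact ih (PySem.Set.add ks p) (fun q hq => h q (by simp [hq]))

-- ===== VERDICT (by name: the statement is the Claim_ definition above) =====
theorem group_band_columns_spec : Claim_equal_group_band_columns := by
  intro channel_cols band_prefixes _dom hpre
  unfold Spec_group_band_columns group_band_columns group_band_columns_alt
  simp only [pv_sortedByKey_eq]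
  -- A side
  have hA := pv_A_fold channel_cols band_prefixes [] hpre
  simp only [List.map_nil] at hA
  have hdedup : band_prefixes.foldl PySem.Set.add [] = PySem.List.dedup band_prefixes := rfl
  rw [hdedup] at hA
  rw [show (PySem.Dict.mk ([] : List (String × List String))) = PySem.Dict.empty from rfl] at hA
  rw [hA]
  -- B side: one pass over the globally sorted columns
  have hB := pv_bucket_fold (PySem.List.sorted channel_cols pvExtractMonth)
    (PySem.List.dedup band_prefixes) (fun _ => [])
  simp only [List.nil_append] at hB
  -- stability: each bucket is the per-group sorted list pvG
  have hbuck : ∀ p : String,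
      (PySem.List.sorted channel_cols pvExtractMonth).filter
        (fun col => PySem.Str.startswith col p) = pvG channel_cols p := by
    intro p
    exact pv_filter_sorted pvExtractMonth (fun col => PySem.Str.startswith col p) channel_cols
  simp only [hbuck] at hB
  simp only [hB]
  -- no bucket is empty
  have hany : ((PySem.List.dedup band_prefixes).map
      (fun p => (p, pvG channel_cols p))).any (fun pb => pb.2.isEmpty) = false := by
    rw [List.any_map]
    simp only [List.any_eq_false, Function.comp_apply]
    intro p hp
    obtain ⟨c, hc, hsw⟩ := hpre p ((PySem.List.mem_dedup band_prefixes p).mp hp)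
    simp only [Bool.not_eq_true, List.isEmpty_eq_false_iff, ne_eq, pvG,
      PySem.List.sorted_eq_nil_iff, List.filter_eq_nil_iff, not_forall]
    exact ⟨c, hc, by simpa using hsw⟩
  rw [hany]
  simp
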